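-- pv_equiv track=rewrite | github.com/mbuhidar/thrift_assist | utils/text_utils.py | is_meaningful_phrase
-- ===== SOURCE A (Python) =====
-- from typing import Set
--
-- def is_meaningful_phrase(phrase: str, common_words: Set[str]) -> bool:
--     """
--     Check if a phrase is meaningful (not just common words).
--     Returns True if the phrase should be searched for.
--     """
--     words = phrase.lower().strip().split()
--
--     if len(words) == 1:
--         return words[0] not in common_words
--
--     non_common = [w for w in words if w not in common_words]
--     return bool(non_common) or len(set(words)) < len(words)
--     words = phrase.lower().strip().split()
--
--     if len(words) == 1:
--         return words[0] not in common_words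
--
--     non_common = [w for w in words if w not in common_words]
--     return bool(non_common) or len(set(words)) < len(words)
-- ===== SOURCE B (Python) =====
-- def is_meaningful_phrase(phrase: str, common_words) -> bool:
--     """Single early-exit pass: True on the first non-common word or the first
--     repeated word; False if every word is common and distinct."""
--     seen = set()
--     for w in phrase.lower().strip().split():
--         if w not in common_words:
--             return True
--         if w in seen:
--             return True
--         seen.add(w)
--     return False
-- ===== Notes on version B (the rewrite author's own statement) =====
-- stated objective: simpler
-- what changed: Replaced A's two separate scans (a non-common comprehension plus a set(words)-vs-len duplicate check, with a redundant single-word branch) by one early-exit pass maintaining a seen-set.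
import Mathlib
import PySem

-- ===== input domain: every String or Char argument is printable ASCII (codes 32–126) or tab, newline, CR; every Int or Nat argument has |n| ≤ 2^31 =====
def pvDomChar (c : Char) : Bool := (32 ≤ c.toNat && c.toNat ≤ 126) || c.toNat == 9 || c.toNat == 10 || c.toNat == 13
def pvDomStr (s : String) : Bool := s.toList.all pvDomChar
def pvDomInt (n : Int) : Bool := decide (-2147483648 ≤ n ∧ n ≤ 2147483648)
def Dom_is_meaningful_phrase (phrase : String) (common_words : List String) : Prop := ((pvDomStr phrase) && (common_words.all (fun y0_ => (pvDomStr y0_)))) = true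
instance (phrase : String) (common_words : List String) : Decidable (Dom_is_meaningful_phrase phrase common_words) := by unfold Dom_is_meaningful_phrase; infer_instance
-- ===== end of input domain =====

-- B replaces A's two separate scans by one early-exit pass with a seen-set (objective: simpler).

-- ===== PORT A =====
def is_meaningful_phrase (phrase : String) (common_words : List String) : Bool :=
  let words := PySem.Str.split₀ (PySem.Str.strip (PySem.Str.lower phrase))
  if words.length == 1 then
    !(common_words.contains (words.getD 0 ""))   -- words[0]; in range since length = 1
  else
    let non_common := words.filter (fun w => !(common_words.contains w))
    (!non_common.isEmpty) || decide ((PySem.Set.ofList words).length < words.length)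

-- ===== PORT B =====
-- the for-loop of Source B: early return on a non-common or already-seen word
def pvLoopB (common_words : List String) : List String → PySem.Set String → Bool
  | [], _ => false
  | w :: ws, seen =>
    if !(common_words.contains w) then true
    else if PySem.Set.contains seen w then true
    else pvLoopB common_words ws (PySem.Set.add seen w)

def is_meaningful_phrase_alt (phrase : String) (common_words : List String) : Bool :=
  pvLoopB common_words (PySem.Str.split₀ (PySem.Str.strip (PySem.Str.lower phrase))) PySem.Set.empty

-- ===== PRECONDITION & SPEC =====
def Spec_is_meaningful_phrase (phrase : String) (common_words : List String) (out : Bool) : Prop := out = is_meaningful_phrase_alt phrase common_words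
instance (phrase : String) (common_words : List String) (out : Bool) : Decidable (Spec_is_meaningful_phrase phrase common_words out) := by unfold Spec_is_meaningful_phrase; infer_instance

-- ===== CLAIM (what is proved, stated in full; the proofs are below) =====
def Claim_equal_is_meaningful_phrase : Prop := ∀ (phrase : String) (common_words : List String), Dom_is_meaningful_phrase phrase common_words → Spec_is_meaningful_phrase phrase common_words (is_meaningful_phrase phrase common_words)

-- ===== LEMMAS AND PROOFS =====

-- set(xs) is strictly smaller than xs exactly when xs has a repeat
theorem pv_ofList_lt_iff (xs : List String) :
    (PySem.Set.ofList xs).length < xs.length ↔ ¬ xs.Nodup := by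
  induction xs with
  | nil => simp [PySem.Set.ofList_nil]
  | cons x xs ih =>
    rw [PySem.Set.ofList_cons]
    by_cases hx : x ∈ xs
    · constructor
      · intro _; simp [List.nodup_cons, hx]
      · intro _
        have h1 : (PySem.Set.discard (PySem.Set.ofList xs) x).length < (PySem.Set.ofList xs).length := by
          simp only [PySem.Set.discard]
          apply List.length_filter_lt_length_iff_exists.mpr
          exact ⟨x, (PySem.Set.mem_ofList xs x).mpr hx, by simp⟩
        have h2 := PySem.Set.length_ofList_le (xs := xs)
        simp only [List.length_cons]
        omega
    · have hd : PySem.Set.discard (PySem.Set.ofList xs) x = PySem.Set.ofList xs := by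
        simp only [PySem.Set.discard]
        apply List.filter_eq_self.mpr
        intro a ha
        have : a ∈ xs := (PySem.Set.mem_ofList xs a).mp ha
        simp; rintro rfl; exact hx this
      rw [hd]
      simp [List.nodup_cons, hx, ih]

-- characterisation of B's loop
theorem pv_loop_iff (common : List String) (ws : List String) (seen : PySem.Set String)
    (h : seen.Nodup) :
    pvLoopB common ws seen = true ↔ (∃ w ∈ ws, ¬ common.contains w = true) ∨ ¬ (seen ++ ws).Nodup := by
  induction ws generalizing seen with
  | nil => simp [pvLoopB, h]
  | cons w ws ih =>
    by_cases hc : common.contains w = true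
    · by_cases hs : w ∈ seen
      · have hnd : ¬ (seen ++ w :: ws).Nodup := by
          intro hn
          exact (List.disjoint_of_nodup_append hn) hs (by simp)
        have hcw : PySem.Set.contains seen w = true := (PySem.Set.contains_iff seen w).mpr hs
        simp only [pvLoopB, hcw, hc]
        simp [hnd]
      · have hadd : PySem.Set.add seen w = seen ++ [w] := PySem.Set.add_of_not_mem hs
        have hcont : PySem.Set.contains seen w = false := by
          cases hcc : PySem.Set.contains seen w
          · rfl
          · exact absurd ((PySem.Set.contains_iff seen w).mp hcc) hs
        have hn2 : (PySem.Set.add seen w).Nodup := PySem.Set.nodup_add seen w h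
        have hmc : w ∈ common := by simpa using hc
        rw [show pvLoopB common (w :: ws) seen = pvLoopB common ws (PySem.Set.add seen w) by
          simp [pvLoopB, hmc, hs]]
        rw [ih _ hn2, hadd]
        constructor
        · rintro (⟨x, hx, hnc⟩ | hnd)
          · exact Or.inl ⟨x, by simp [hx], hnc⟩
          · exact Or.inr (by simpa using hnd)
        · rintro (⟨x, hx, hnc⟩ | hnd)
          · rcases List.mem_cons.mp hx with rfl | hx'
            · exact absurd hc hnc
            · exact Or.inl ⟨x, hx', hnc⟩
          · exact Or.inr (by simpa using hnd)
    · constructor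
      · intro _
        exact Or.inl ⟨w, by simp, hc⟩
      · intro _
        have hmc : w ∉ common := by simpa using hc
        simp [pvLoopB, hmc]


-- ===== VERDICT (by name: the statement is the Claim_ definition above) =====
theorem is_meaningful_phrase_spec : Claim_equal_is_meaningful_phrase := by
  intro phrase common _
  unfold Spec_is_meaningful_phrase is_meaningful_phrase is_meaningful_phrase_alt
  generalize (PySem.Str.split₀ (PySem.Str.strip (PySem.Str.lower phrase))) = words
  have hB := pv_loop_iff common words PySem.Set.empty (by simp [PySem.Set.empty])
  simp only [PySem.Set.empty, List.nil_append] at hB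
  match words with
  | [] => simp [pvLoopB]
  | [w] =>
    cases hc : common.contains w <;>
      simp [pvLoopB, PySem.Set.empty, PySem.Set.contains, by simpa using hc]
  | w1 :: w2 :: ws =>
    have hlen : ((w1 :: w2 :: ws).length == 1) = false := by simp
    simp only [PySem.Set.empty, hlen, Bool.false_eq_true, if_false]
    rw [Bool.eq_iff_iff, hB]
    constructor
    · intro hA
      rcases Bool.or_eq_true_iff.mp hA with h1 | h2
      · left
        have hne : List.filter (fun w => !common.contains w) (w1 :: w2 :: ws) ≠ [] :=
          List.isEmpty_eq_false_iff.mp (by simpa using h1)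
        rcases List.exists_mem_of_ne_nil _ hne with ⟨x, hx⟩
        rcases List.mem_filter.mp hx with ⟨hx1, hx2⟩
        exact ⟨x, hx1, by simpa using hx2⟩
      · right
        exact (pv_ofList_lt_iff _).mp (of_decide_eq_true h2)
    · intro hBB
      apply Bool.or_eq_true_iff.mpr
      rcases hBB with ⟨x, hx, hnc⟩ | hnd
      · left
        have hne : List.filter (fun w => !common.contains w) (w1 :: w2 :: ws) ≠ [] :=
          List.ne_nil_of_mem (List.mem_filter.mpr ⟨hx, by simpa using hnc⟩)
        have h0 : (List.filter (fun w => !common.contains w) (w1 :: w2 :: ws)).isEmpty = false :=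
          List.isEmpty_eq_false_iff.mpr hne
        rw [h0]; rfl
      · right
        exact decide_eq_true ((pv_ofList_lt_iff _).mpr hnd)
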